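-- pv_equiv track=rewrite | github.com/berenslab/retina-rl | runner/analyze.py | _wandb_title
-- ===== SOURCE A (Python) =====
-- def _wandb_title(title: str) -> str:
--     # Split the title by slashes
--     parts = title.split("/")
--
--     def capitalize_part(part: str) -> str:
--         # Split the part by dashes
--         words = part.split("-")
--         # Capitalize each word
--         capitalized_words = [word.capitalize() for word in words]
--         # Join the words with spaces
--         return " ".join(capitalized_words)
--
--     # Capitalize each part, then join with slashes
--     capitalized_parts = [capitalize_part(part) for part in parts]
--     return "/".join(capitalized_parts)
-- ===== SOURCE B (Python) =====
-- def _wandb_title(title: str) -> str: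
--     # Single left-to-right character state machine: a flag marks the start of a
--     # word; separators emit their replacement and reset the flag.
--     out = []
--     start = True
--     for c in title:
--         if c == '/':
--             out.append('/')
--             start = True
--         elif c == '-':
--             out.append(' ')
--             start = True
--         else:
--             out.append(c.upper() if start else c.lower())
--             start = False
--     return ''.join(out)
-- ===== Notes on version B (the rewrite author's own statement) =====
-- stated objective: simpler
-- what changed: Replaced the two-level split/capitalize/join over slashes and dashes with a single left-to-right character state machine carrying a word-start flag, emitting each output character directly.
import Mathlib
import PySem

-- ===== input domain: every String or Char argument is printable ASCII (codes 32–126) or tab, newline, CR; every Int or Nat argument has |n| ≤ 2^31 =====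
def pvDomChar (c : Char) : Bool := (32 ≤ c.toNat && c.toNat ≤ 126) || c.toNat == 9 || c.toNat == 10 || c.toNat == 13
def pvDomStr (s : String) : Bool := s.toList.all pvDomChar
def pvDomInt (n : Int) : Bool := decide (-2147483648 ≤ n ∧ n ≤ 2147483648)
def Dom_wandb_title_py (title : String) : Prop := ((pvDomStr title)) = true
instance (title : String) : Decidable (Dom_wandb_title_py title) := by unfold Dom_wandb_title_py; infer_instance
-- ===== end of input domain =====

-- B replaces A's nested split/capitalize/join with one character-level state
-- machine carrying a word-start flag (objective: simpler decomposition).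

-- ===== PORT A =====
-- str.split(sep) for a ONE-CHARACTER separator, ported by hand (exact there):
-- Python's split on a single char yields the chunks between its occurrences.
def pvSplitChar (sep : Char) : List Char → List (List Char)
  | [] => [[]]
  | c :: cs =>
    if c = sep then [] :: pvSplitChar sep cs
    else
      match pvSplitChar sep cs with
      | t :: ts => (c :: t) :: ts
      | [] => [[c]]

-- str.capitalize(): first char uppercased, rest lowered (exact on ASCII)
def pvCapitalize : List Char → List Char
  | [] => []
  | c :: cs => PySem.Chars.upperChar c :: PySem.Chars.lower cs

def pvCapitalizePart (part : List Char) : List Char :=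
  PySem.Chars.join [' '] ((pvSplitChar '-' part).map pvCapitalize)

def wandb_title_py (title : String) : String :=
  String.mk (PySem.Chars.join ['/'] ((pvSplitChar '/' title.toList).map pvCapitalizePart))

-- ===== PORT B =====
-- one pass over the characters; the Bool is the word-start flag
def pvScan : Bool → List Char → List Char
  | _, [] => []
  | start, c :: cs =>
    if c = '/' then '/' :: pvScan true cs
    else if c = '-' then ' ' :: pvScan true cs
    else (if start then PySem.Chars.upperChar c else PySem.Chars.lowerChar c) :: pvScan false cs

def wandb_title_py_alt (title : String) : String :=
  String.mk (pvScan true title.toList)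

-- ===== PRECONDITION & SPEC =====
def Spec_wandb_title_py (title : String) (out : String) : Prop := out = wandb_title_py_alt title
instance (title : String) (out : String) : Decidable (Spec_wandb_title_py title out) := by unfold Spec_wandb_title_py; infer_instance

-- ===== CLAIM (what is proved, stated in full; the proofs are below) =====
def Claim_equal_wandb_title_py : Prop := ∀ (title : String), Dom_wandb_title_py title → Spec_wandb_title_py title (wandb_title_py title)

-- ===== LEMMAS AND PROOFS =====

-- character-level version of A's port, used by the induction
def pvAFun (cs : List Char) : List Char :=
  PySem.Chars.join ['/'] ((pvSplitChar '/' cs).map pvCapitalizePart)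

def pvWordChar (c : Char) : Bool := !(c == '/' || c == '-')

theorem pvSplitChar_ne_nil (sep : Char) (cs : List Char) : pvSplitChar sep cs ≠ [] := by
  induction cs with
  | nil => simp [pvSplitChar]
  | cons c cs ih =>
    simp only [pvSplitChar]
    split_ifs
    · simp
    · cases h : pvSplitChar sep cs with
      | nil => exact absurd h ih
      | cons t ts => simp

theorem pvSplitChar_pre (sep : Char) (w cs : List Char) (t : List Char) (ts : List (List Char))
    (hw : ∀ c ∈ w, c ≠ sep) (hcs : pvSplitChar sep cs = t :: ts) :
    pvSplitChar sep (w ++ cs) = (w ++ t) :: ts := by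
  induction w with
  | nil => simpa using hcs
  | cons c w ih =>
    have hc : c ≠ sep := hw c (by simp)
    have ih' := ih (fun d hd => hw d (by simp [hd]))
    simp only [List.cons_append, pvSplitChar, if_neg hc, ih']

theorem pvJoin_cons (sep : List Char) (x : List Char) (l : List (List Char)) :
    PySem.Chars.join sep (x :: l) = x ++ (l.map (fun y => sep ++ y)).flatten := by
  induction l generalizing x with
  | nil => simp [PySem.Chars.join, List.intercalate]
  | cons y l ih =>
    simp only [PySem.Chars.join, List.intercalate] at ih ⊢
    simp [List.intersperse] at ih ⊢
    simp [ih y, List.append_assoc]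

-- capitalize-and-space-join of a part whose first dash-free chunk is w
theorem pvCapitalizePart_break (w t : List Char) (hw : ∀ c ∈ w, c ≠ '-') :
    pvCapitalizePart (w ++ '-' :: t) = pvCapitalize w ++ ' ' :: pvCapitalizePart t := by
  obtain ⟨u, us, hu⟩ : ∃ u us, pvSplitChar '-' t = u :: us := by
    cases h : pvSplitChar '-' t with
    | nil => exact absurd h (pvSplitChar_ne_nil _ _)
    | cons u us => exact ⟨u, us, rfl⟩
  have h1 : pvSplitChar '-' ('-' :: t) = [] :: u :: us := by
    simp [pvSplitChar, hu]
  have h2 := pvSplitChar_pre '-' w ('-' :: t) [] (u :: us) hw h1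
  simp only [List.append_nil] at h2
  simp only [pvCapitalizePart, h2, hu, List.map_cons]
  rw [pvJoin_cons, pvJoin_cons]
  simp [List.append_assoc]

theorem pvCapitalizePart_nosep (w : List Char) (hw : ∀ c ∈ w, c ≠ '-') :
    pvCapitalizePart w = pvCapitalize w := by
  have h : pvSplitChar '-' w = [w] := by
    have := pvSplitChar_pre '-' w [] [] [] hw (by simp [pvSplitChar])
    simpa using this
  simp [pvCapitalizePart, h, pvJoin_cons]

theorem pvWordChar_ne (c : Char) (h : pvWordChar c = true) : c ≠ '/' ∧ c ≠ '-' := by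
  simp [pvWordChar] at h; exact h

-- B-side structure lemmas
theorem pvScan_false_word (w r : List Char) (hw : ∀ c ∈ w, pvWordChar c = true) :
    pvScan false (w ++ r) = PySem.Chars.lower w ++ pvScan false r := by
  induction w with
  | nil => simp [PySem.Chars.lower]
  | cons c w ih =>
    obtain ⟨h1, h2⟩ := pvWordChar_ne c (hw c (by simp))
    have ih' := ih (fun d hd => hw d (by simp [hd]))
    simp [pvScan, if_neg h1, if_neg h2, ih', PySem.Chars.lower]

theorem pvScan_true_word (w r : List Char) (hw : ∀ c ∈ w, pvWordChar c = true) :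
    pvScan true (w ++ r) = pvCapitalize w ++ (if w = [] then pvScan true r else pvScan false r) := by
  cases w with
  | nil => simp [pvCapitalize]
  | cons c w =>
    obtain ⟨h1, h2⟩ := pvWordChar_ne c (hw c (by simp))
    have h := pvScan_false_word w r (fun d hd => hw d (by simp [hd]))
    simp [pvScan, if_neg h1, if_neg h2, h, pvCapitalize]

theorem pvScan_flag_sep (s : Char) (rest : List Char) (hs : s = '/' ∨ s = '-') :
    pvScan false (s :: rest) = pvScan true (s :: rest) := by
  rcases hs with h | h <;> subst h <;> simp [pvScan]

theorem pvMain : ∀ (n : Nat) (cs : List Char), cs.length ≤ n → pvAFun cs = pvScan true cs := by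
  intro n
  induction n with
  | zero =>
    intro cs h
    have : cs = [] := List.eq_nil_of_length_eq_zero (Nat.le_zero.mp h)
    subst this
    simp [pvAFun, pvScan, pvSplitChar, pvJoin_cons, pvCapitalizePart, pvCapitalize]
  | succ n ih =>
    intro cs hlen
    -- split cs at the first separator
    have hdecomp := List.takeWhile_append_dropWhile (p := pvWordChar) (l := cs)
    set w := cs.takeWhile pvWordChar with hw
    set r := cs.dropWhile pvWordChar with hr
    have hwall : ∀ c ∈ w, pvWordChar c = true := fun c hc => List.mem_takeWhile_imp hc
    have hnoslash : ∀ c ∈ w, c ≠ '/' := fun c hc => (pvWordChar_ne c (hwall c hc)).1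
    have hnodash : ∀ c ∈ w, c ≠ '-' := fun c hc => (pvWordChar_ne c (hwall c hc)).2
    cases hrc : r with
    | nil =>
      -- no separator at all
      have hcs : cs = w := by rw [← hdecomp, hrc, List.append_nil]
      have hA : pvSplitChar '/' w = [w] := by
        have := pvSplitChar_pre '/' w [] [] [] hnoslash (by simp [pvSplitChar])
        simpa using this
      have hB := pvScan_true_word w [] hwall
      rw [hcs]
      simp only [List.append_nil] at hB
      rw [pvAFun, hA, List.map_cons, List.map_nil, pvJoin_cons,
        pvCapitalizePart_nosep w hnodash, hB]
      split_ifs <;> simp [pvScan]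
    | cons s rest =>
      have hs : pvWordChar s = false := by
        have : r.head? = some s := by rw [hrc]; rfl
        have h2 := List.head?_dropWhile_not pvWordChar cs
        rw [← hr] at h2
        cases hh : r.head? with
        | none => rw [hh] at this; cases this
        | some x =>
          rw [hh] at this h2
          cases this
          simpa using h2
      have hsep : s = '/' ∨ s = '-' := by
        simp [pvWordChar] at hs
        by_cases h : s = '/'
        · left; exact h
        · right; exact hs h
      have hcs : cs = w ++ s :: rest := by rw [← hdecomp, hrc]
      have hrest_len : rest.length ≤ n := by
        have : cs.length = w.length + (s :: rest).length := by rw [hcs]; simp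
        simp at this
        omega
      have ihrest := ih rest hrest_len
      -- B side: scan through the word, then the separator resets the flag
      have hBw := pvScan_true_word w (s :: rest) hwall
      have hBflag : pvScan false (s :: rest) = pvScan true (s :: rest) := pvScan_flag_sep s rest hsep
      have hB : pvScan true cs = pvCapitalize w ++ pvScan true (s :: rest) := by
        rw [hcs, hBw]
        split_ifs with h
        · rfl
        · rw [hBflag]
      rcases hsep with hS | hS
      · -- separator '/'
        subst hS
        obtain ⟨t, ts, ht⟩ : ∃ t ts, pvSplitChar '/' rest = t :: ts := by
          cases h : pvSplitChar '/' rest with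
          | nil => exact absurd h (pvSplitChar_ne_nil _ _)
          | cons t ts => exact ⟨t, ts, rfl⟩
        have hsplit : pvSplitChar '/' cs = w :: t :: ts := by
          rw [hcs]
          have h1 : pvSplitChar '/' ('/' :: rest) = [] :: t :: ts := by
            simp [pvSplitChar, ht]
          have := pvSplitChar_pre '/' w ('/' :: rest) [] (t :: ts) hnoslash h1
          simpa using this
        have hA : pvAFun cs = pvCapitalize w ++ '/' :: pvAFun rest := by
          simp only [pvAFun, hsplit, ht, List.map_cons]
          rw [pvJoin_cons, pvJoin_cons, pvCapitalizePart_nosep w hnodash]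
          simp [List.append_assoc]
        rw [hA, hB, ihrest]
        simp [pvScan]
      · -- separator '-'
        subst hS
        obtain ⟨t, ts, ht⟩ : ∃ t ts, pvSplitChar '/' rest = t :: ts := by
          cases h : pvSplitChar '/' rest with
          | nil => exact absurd h (pvSplitChar_ne_nil _ _)
          | cons t ts => exact ⟨t, ts, rfl⟩
        have hsplit : pvSplitChar '/' cs = (w ++ '-' :: t) :: ts := by
          rw [hcs]
          have h1 : pvSplitChar '/' ('-' :: rest) = ('-' :: t) :: ts := by
            simp [pvSplitChar, ht]
          exact pvSplitChar_pre '/' w ('-' :: rest) ('-' :: t) ts hnoslash h1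
        have hA : pvAFun cs = pvCapitalize w ++ ' ' :: pvAFun rest := by
          simp only [pvAFun, hsplit, ht, List.map_cons]
          rw [pvJoin_cons, pvJoin_cons, pvCapitalizePart_break w t hnodash]
          simp [List.map_map, List.append_assoc, Function.comp]
        rw [hA, hB, ihrest]
        simp [pvScan]

-- ===== VERDICT (by name: the statement is the Claim_ definition above) =====
theorem wandb_title_py_spec : Claim_equal_wandb_title_py := by
  intro title _
  unfold Spec_wandb_title_py wandb_title_py wandb_title_py_alt
  have := pvMain title.toList.length title.toList le_rfl
  simp only [pvAFun] at this
  rw [this]
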